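-- pv_equiv track=rewrite | github.com/Julio-Lopez-Cancino/100DaysofCode | love_calculator_day1.py | check_love
-- ===== SOURCE A (Python) =====
-- def check_love(a, b):
--     c = a.lower() + b.lower()
--     in_true = ['t', 'r', 'u', 'e']
--     in_love = ['l', 'o', 'v', 'e']
--     num1 = 0
--     num2 = 0
--     for x in in_true:
--         if x in c:
--             num1 += c.count(x)
--     for x in in_love:
--         if x in c:
--             num2 += c.count(x)
--     return str(num1) + str(num2)
-- ===== SOURCE B (Python) =====
-- def check_love(a, b):
--     c = a.lower() + b.lower()
--     true_set = set('true')
--     love_set = set('love')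
--     num1 = 0
--     num2 = 0
--     for ch in c:
--         if ch in true_set:
--             num1 += 1
--         if ch in love_set:
--             num2 += 1
--     return str(num1) + str(num2)
-- ===== Notes on version B (the rewrite author's own statement) =====
-- stated objective: idiomatic
-- what changed: Replaces A's letter-first structure (two loops over the 4 letters, each scanning c with 'in' and .count) by one character-first pass over c with two set-membership counters.
import Mathlib
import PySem

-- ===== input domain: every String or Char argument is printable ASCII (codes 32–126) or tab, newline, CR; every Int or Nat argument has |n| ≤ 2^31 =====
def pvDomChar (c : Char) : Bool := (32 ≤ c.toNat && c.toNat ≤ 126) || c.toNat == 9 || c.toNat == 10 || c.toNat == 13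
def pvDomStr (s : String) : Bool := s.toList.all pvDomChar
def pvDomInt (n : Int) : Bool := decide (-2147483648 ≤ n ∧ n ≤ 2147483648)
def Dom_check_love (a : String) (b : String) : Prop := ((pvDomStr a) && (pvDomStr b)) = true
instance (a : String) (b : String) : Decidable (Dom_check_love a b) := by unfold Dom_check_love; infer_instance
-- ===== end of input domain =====

-- B: one character-first pass over c with two set-membership counters instead of A's two letter-first loops with 'in' + .count scans (idiomatic, not claimed faster).


-- ===== PORT A =====
-- Python's `x in c` / `c.count(x)` for a 1-char x on a string are char membership / char count.
def check_love (a : String) (b : String) : String :=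
  let c := PySem.Chars.lower a.toList ++ PySem.Chars.lower b.toList
  let in_true := ['t', 'r', 'u', 'e']
  let in_love := ['l', 'o', 'v', 'e']
  let num1 : Int := in_true.foldl (fun n x => if c.contains x then n + (c.count x : Int) else n) 0
  let num2 : Int := in_love.foldl (fun n x => if c.contains x then n + (c.count x : Int) else n) 0
  PySem.Int.toStr num1 ++ PySem.Int.toStr num2

-- ===== PORT B =====
def check_love_alt (a : String) (b : String) : String :=
  let c := PySem.Chars.lower a.toList ++ PySem.Chars.lower b.toList
  let true_set := PySem.Set.ofList "true".toList
  let love_set := PySem.Set.ofList "love".toList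
  let p := c.foldl (fun (nm : Int × Int) ch =>
      (if true_set.contains ch then nm.1 + 1 else nm.1,
       if love_set.contains ch then nm.2 + 1 else nm.2)) (0, 0)
  PySem.Int.toStr p.1 ++ PySem.Int.toStr p.2

-- ===== PRECONDITION & SPEC =====
def Spec_check_love (a : String) (b : String) (out : String) : Prop := out = check_love_alt a b
instance (a : String) (b : String) (out : String) : Decidable (Spec_check_love a b out) := by unfold Spec_check_love; infer_instance

-- ===== CLAIM (what is proved, stated in full; the proofs are below) =====
def Claim_equal_check_love : Prop := ∀ (a : String) (b : String), Dom_check_love a b → Spec_check_love a b (check_love a b)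

-- ===== LEMMAS AND PROOFS =====

theorem pv_fold_pair_split (c : List Char) (n1 n2 : Int) :
    c.foldl (fun (nm : Int × Int) ch =>
      (if (PySem.Set.ofList "true".toList).contains ch then nm.1 + 1 else nm.1,
       if (PySem.Set.ofList "love".toList).contains ch then nm.2 + 1 else nm.2)) (n1, n2)
    = (c.foldl (fun n ch => if (PySem.Set.ofList "true".toList).contains ch then n + 1 else n) n1,
       c.foldl (fun n ch => if (PySem.Set.ofList "love".toList).contains ch then n + 1 else n) n2) := by
  induction c generalizing n1 n2 with
  | nil => rfl
  | cons x xs ih => simp only [List.foldl_cons, ih]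

theorem pv_countP_true (c : List Char) :
    c.countP (fun ch => (PySem.Set.ofList "true".toList).contains ch)
    = c.count 't' + c.count 'r' + c.count 'u' + c.count 'e' := by
  induction c with
  | nil => rfl
  | cons x xs ih =>
    simp only [List.countP_cons, List.count_cons, ih]
    by_cases h1 : x = 't' <;> by_cases h2 : x = 'r' <;> by_cases h3 : x = 'u' <;>
      by_cases h4 : x = 'e' <;> simp [h1, h2, h3, h4] <;> omega

theorem pv_countP_love (c : List Char) :
    c.countP (fun ch => (PySem.Set.ofList "love".toList).contains ch)
    = c.count 'l' + c.count 'o' + c.count 'v' + c.count 'e' := by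
  induction c with
  | nil => rfl
  | cons x xs ih =>
    simp only [List.countP_cons, List.count_cons, ih]
    by_cases h1 : x = 'l' <;> by_cases h2 : x = 'o' <;> by_cases h3 : x = 'v' <;>
      by_cases h4 : x = 'e' <;> simp [h1, h2, h3, h4] <;> omega

theorem pv_letter_fold (c : List Char) (xs : List Char) (m : Int) :
    xs.foldl (fun n x => if c.contains x then n + (c.count x : Int) else n) m
    = m + (xs.map (fun x => (c.count x : Int))).sum := by
  have step : ∀ (n : Int) (x : Char),
      (if c.contains x then n + (c.count x : Int) else n) = n + (c.count x : Int) := by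
    intro n x
    split_ifs with hc
    · rfl
    · simp only [List.contains_eq_mem, decide_eq_true_eq] at hc
      simp [List.count_eq_zero_of_not_mem hc]
  induction xs generalizing m with
  | nil => simp
  | cons y ys ih =>
    rw [List.foldl_cons, step m y, ih]
    simp only [List.map_cons, List.sum_cons]
    ring

-- ===== VERDICT (by name: the statement is the Claim_ definition above) =====
theorem check_love_spec : Claim_equal_check_love := by
  intro a b _
  unfold Spec_check_love check_love check_love_alt
  dsimp only
  rw [pv_fold_pair_split, PySem.List.foldl_if_add_one, PySem.List.foldl_if_add_one,
    pv_countP_true, pv_countP_love, pv_letter_fold, pv_letter_fold]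
  simp only [List.map_cons, List.map_nil, List.sum_cons, List.sum_nil]
  push_cast
  ring_nf
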